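-- pv_equiv track=rewrite | github.com/kryptops/lycanthropy | svc/lycanthropy/sql/security.py | chkJobid
-- ===== SOURCE A (Python) =====
-- def chkJobid(jobID):
--     randAlpha = 'ABCDEFGHIJKLMNOPQRSTUVWXYZabcdefghijklmnopqrstuvwxyz0123456789!@#$%^&*'
--     legalLength = 6
--     if 'ROTID' in jobID:
--         legalLength = 11
--     if len(jobID) == legalLength:
--         for ch in jobID:
--             if ch not in randAlpha:
--                 return False
--         return True
--     else:
--         return False
-- ===== SOURCE B (Python) =====
-- import re
--
-- def chkJobid(jobID):
--     legalLength = 11 if 'ROTID' in jobID else 6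
--     return bool(re.fullmatch('[A-Za-z0-9!@#$%^&*]{' + str(legalLength) + '}', jobID))
-- ===== Notes on version B (the rewrite author's own statement) =====
-- stated objective: idiomatic
-- what changed: Replaces the explicit character loop with membership test against a 70-char literal by a single re.fullmatch over the range-based character class [A-Za-z0-9!@#$%^&*] with an exact repetition count, enforcing length and alphabet in one matcher.
import Mathlib
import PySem

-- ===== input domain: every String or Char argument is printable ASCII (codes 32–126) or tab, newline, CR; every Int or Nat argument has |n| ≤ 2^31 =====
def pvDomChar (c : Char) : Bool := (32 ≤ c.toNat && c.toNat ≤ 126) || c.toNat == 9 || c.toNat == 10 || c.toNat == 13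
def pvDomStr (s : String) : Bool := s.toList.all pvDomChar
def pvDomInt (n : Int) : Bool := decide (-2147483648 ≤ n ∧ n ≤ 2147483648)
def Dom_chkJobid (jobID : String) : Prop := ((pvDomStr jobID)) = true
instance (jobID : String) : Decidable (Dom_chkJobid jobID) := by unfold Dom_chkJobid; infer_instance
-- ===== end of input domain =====

-- ===== PORT A =====
-- B validates with a single regex-style full match (length + range-based character class) instead of A's per-character scan of a 70-char literal; idiomatic rewrite.
-- A's for-loop with early return, as structural recursion over the characters.
def chkLoopA (randAlpha : List Char) : List Char → Bool
  | [] => true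
  | ch :: rest => if !(randAlpha.contains ch) then false else chkLoopA randAlpha rest

def chkJobid (jobID : String) : Bool :=
  let randAlpha := "ABCDEFGHIJKLMNOPQRSTUVWXYZabcdefghijklmnopqrstuvwxyz0123456789!@#$%^&*"
  let legalLength : Int := if PySem.Str.isIn "ROTID" jobID then 11 else 6
  if PySem.Str.len jobID = legalLength then chkLoopA randAlpha.toList jobID.toList
  else false

-- ===== PORT B =====
-- the character class [A-Za-z0-9!@#$%^&*] of B's regex, as code-point ranges
def classCharB (c : Char) : Bool :=
  let n := c.toNat
  (65 ≤ n && n ≤ 90) || (97 ≤ n && n ≤ 122) || (48 ≤ n && n ≤ 57) ||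
  n == 33 || n == 64 || n == 35 || n == 36 || n == 37 || n == 94 || n == 38 || n == 42

-- re.fullmatch('[class]{L}', s) ported as: len(s) = L and every char matches the class
def chkJobid_alt (jobID : String) : Bool :=
  let legalLength : Int := if PySem.Str.isIn "ROTID" jobID then 11 else 6
  (PySem.Str.len jobID == legalLength) && jobID.toList.all classCharB

-- ===== PRECONDITION & SPEC =====
def Spec_chkJobid (jobID : String) (out : Bool) : Prop := out = chkJobid_alt jobID
instance (jobID : String) (out : Bool) : Decidable (Spec_chkJobid jobID out) := by unfold Spec_chkJobid; infer_instance

-- ===== CLAIM (what is proved, stated in full; the proofs are below) =====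
def Claim_equal_chkJobid : Prop := ∀ (jobID : String), Dom_chkJobid jobID → Spec_chkJobid jobID (chkJobid jobID)

-- ===== LEMMAS AND PROOFS =====
theorem char_eq_iff_toNat (c d : Char) : c = d ↔ c.toNat = d.toNat := by
  constructor
  · rintro rfl; rfl
  · intro h; exact Char.ext (UInt32.toNat_inj.mp h)

theorem mem_alpha_iff_class (c : Char) :
    ("ABCDEFGHIJKLMNOPQRSTUVWXYZabcdefghijklmnopqrstuvwxyz0123456789!@#$%^&*".toList.contains c)
      = classCharB c := by
  have hmap : "ABCDEFGHIJKLMNOPQRSTUVWXYZabcdefghijklmnopqrstuvwxyz0123456789!@#$%^&*".toList.map Char.toNat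
      = [65, 66, 67, 68, 69, 70, 71, 72, 73, 74, 75, 76, 77, 78, 79, 80, 81, 82, 83, 84, 85, 86, 87, 88, 89, 90, 97, 98, 99, 100, 101, 102, 103, 104, 105, 106, 107, 108, 109, 110, 111, 112, 113, 114, 115, 116, 117, 118, 119, 120, 121, 122, 48, 49, 50, 51, 52, 53, 54, 55, 56, 57, 33, 64, 35, 36, 37, 94, 38, 42] := by decide
  have hmem : c ∈ "ABCDEFGHIJKLMNOPQRSTUVWXYZabcdefghijklmnopqrstuvwxyz0123456789!@#$%^&*".toList
      ↔ c.toNat ∈ "ABCDEFGHIJKLMNOPQRSTUVWXYZabcdefghijklmnopqrstuvwxyz0123456789!@#$%^&*".toList.map Char.toNat := by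
    constructor
    · exact fun h => List.mem_map_of_mem h
    · intro h
      rcases List.mem_map.1 h with ⟨d, hd, he⟩
      rwa [show c = d from (char_eq_iff_toNat c d).2 he.symm]
  rw [hmap] at hmem
  have : ("ABCDEFGHIJKLMNOPQRSTUVWXYZabcdefghijklmnopqrstuvwxyz0123456789!@#$%^&*".toList.contains c = true)
      ↔ (classCharB c = true) := by
    rw [List.contains_iff_mem, hmem]
    simp only [List.mem_cons, List.not_mem_nil, or_false, classCharB, Bool.or_eq_true,
      Bool.and_eq_true, decide_eq_true_eq, beq_iff_eq]
    omega
  exact Bool.eq_iff_iff.2 this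

theorem loopA_eq_all (cs : List Char) :
    chkLoopA "ABCDEFGHIJKLMNOPQRSTUVWXYZabcdefghijklmnopqrstuvwxyz0123456789!@#$%^&*".toList cs
      = cs.all classCharB := by
  induction cs with
  | nil => rfl
  | cons c rest ih =>
    show (if !("ABCDEFGHIJKLMNOPQRSTUVWXYZabcdefghijklmnopqrstuvwxyz0123456789!@#$%^&*".toList.contains c)
          then false else chkLoopA _ rest) = _
    rw [mem_alpha_iff_class c, ih, List.all_cons]
    cases classCharB c <;> rfl

-- ===== VERDICT (by name: the statement is the Claim_ definition above) =====
theorem chkJobid_spec : Claim_equal_chkJobid := by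
  intro jobID _
  unfold Spec_chkJobid chkJobid chkJobid_alt
  dsimp only
  split_ifs with h1 h2 h2
  · rw [loopA_eq_all, h2, beq_self_eq_true, Bool.true_and]
  · rw [beq_eq_false_iff_ne.mpr h2, Bool.false_and]
  · rw [loopA_eq_all, h2, beq_self_eq_true, Bool.true_and]
  · rw [beq_eq_false_iff_ne.mpr h2, Bool.false_and]
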